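-- pv_equiv track=rewrite | github.com/daytrick/A-Most-Annoying-Letter | encrypter.py | bundle
-- ===== SOURCE A (Python) =====
-- letters = ["a", "b", "c", "d", "e", "f", "g", "h", "i", "j", "k", "l", "m", "n", "o", "p", "q", "r", "s", "t", "u", "v", "w", "x", "y", "z"]
--
-- def bundle(text, size):
--     """Remove punctuation from ciphertext and break it into groups."""
--     bundledText = []
--
--     text = text.lower()
--
--     i = 0
--     for char in text:
--
--         if char in letters:
--
--             if (i > 0) and (i % size) == 0:
--                 bundledText.append(" ")
--
--             bundledText.append(char)
--             i += 1
--
--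
--     return "".join(bundledText)
-- ===== SOURCE B (Python) =====
-- def bundle(text, size):
--     """Remove punctuation from ciphertext and break it into groups."""
--     cleaned = "".join(c for c in text.lower() if "a" <= c <= "z")
--     return " ".join(cleaned[i:i+size] for i in range(0, len(cleaned), size))
-- ===== Notes on version B (the rewrite author's own statement) =====
-- stated objective: alternative
-- what changed: Replaces A's single interleaved loop (per-character membership test in a 26-string list plus modulo-driven space insertion) by a filter-then-chunk decomposition: build the cleaned letter string in one pass, then join its size-sized slices.
-- outside the precondition, e.g. on bundle('a', 0): A returns 'a', B raises ValueError; on bundle('ab', 0): A raises ZeroDivisionError, B raises ValueError; on bundle('abc', -2): A returns 'ab c', B returns ''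
import Mathlib
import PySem

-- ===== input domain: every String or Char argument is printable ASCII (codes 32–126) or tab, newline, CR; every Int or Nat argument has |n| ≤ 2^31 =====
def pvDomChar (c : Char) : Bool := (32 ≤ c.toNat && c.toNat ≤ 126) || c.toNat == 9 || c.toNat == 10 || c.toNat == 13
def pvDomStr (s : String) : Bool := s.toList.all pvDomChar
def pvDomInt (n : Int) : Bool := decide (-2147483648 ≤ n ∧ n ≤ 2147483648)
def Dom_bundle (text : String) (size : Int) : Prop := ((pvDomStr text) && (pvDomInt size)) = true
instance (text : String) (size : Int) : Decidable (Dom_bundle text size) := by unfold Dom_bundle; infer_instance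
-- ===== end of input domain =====

-- B replaces A's interleaved running-index/modulo spacing loop by a filter-then-chunk
-- decomposition: build the cleaned letter string once, then join the size-sized slices.

-- ===== PORT A =====
def letters : List String := ["a", "b", "c", "d", "e", "f", "g", "h", "i", "j", "k", "l", "m", "n", "o", "p", "q", "r", "s", "t", "u", "v", "w", "x", "y", "z"]

def bundle (text : String) (size : Int) : String :=
  let t := PySem.Str.lower text
  let st := t.toList.foldl
    (fun (st : List String × Int) char =>
      if letters.contains (String.ofList [char]) then
        ((if st.2 > 0 ∧ PySem.Int.mod st.2 size = 0 then st.1 ++ [" "] else st.1)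
           ++ [String.ofList [char]], st.2 + 1)
      else st)
    ([], 0)
  PySem.Str.join "" st.1

-- ===== PORT B =====
def bundle_alt (text : String) (size : Int) : String :=
  let cleaned : List Char := (PySem.Str.lower text).toList.filter (fun c => 'a' ≤ c && c ≤ 'z')
  PySem.Str.join " "
    ((PySem.List.pyRange 0 (PySem.List.len cleaned) size).map
      (fun i => String.ofList (PySem.List.slice cleaned (some i) (some (i + size)))))

-- ===== PRECONDITION & SPEC =====
-- Pre_ excludes size ≤ 0: there A raises ZeroDivisionError (size = 0 with ≥ 2 letters) or the
-- grouping is an accident of Python's negative modulo — a corner no caller would specify —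
-- while B's slicing raises ValueError (size = 0) or yields no chunks (size < 0).
def Pre_bundle (_text : String) (size : Int) : Prop := 1 ≤ size
instance (text : String) (size : Int) : Decidable (Pre_bundle text size) := by unfold Pre_bundle; infer_instance
def pvWitness_bundle : String × Int := ("Hello, World!", 5)

def Spec_bundle (text : String) (size : Int) (out : String) : Prop := out = bundle_alt text size
instance (text : String) (size : Int) (out : String) : Decidable (Spec_bundle text size out) := by unfold Spec_bundle; infer_instance

-- ===== CLAIM (what is proved, stated in full; the proofs are below) =====
def Claim_equal_bundle : Prop := ∀ (text : String) (size : Int), Dom_bundle text size → Pre_bundle text size → Spec_bundle text size (bundle text size)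

-- ===== LEMMAS AND PROOFS =====

-- A's char-level emission and B's chunking (proof-only helpers)
def pvEmitC (size i : Int) : List Char → List Char
  | [] => []
  | c :: cs => (if i > 0 ∧ PySem.Int.mod i size = 0 then [' '] else []) ++ c :: pvEmitC size (i + 1) cs

def pvEmit (size i : Int) : List Char → List String
  | [] => []
  | c :: cs => (if i > 0 ∧ PySem.Int.mod i size = 0 then [" "] else []) ++ String.ofList [c] :: pvEmit size (i + 1) cs

def pvChunks (km1 : Nat) : List Char → List (List Char)
  | [] => []
  | c :: cs => (c :: cs).take (km1 + 1) :: pvChunks km1 ((c :: cs).drop (km1 + 1))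
  termination_by l => l.length
  decreasing_by simp

theorem pv_char_ofNat_toNat_aux (n : Nat) (h1 : 97 ≤ n) (h2 : n ≤ 122) :
    letters.contains (String.ofList [Char.ofNat n]) = true := by
  interval_cases n <;> decide

theorem pv_contains_eq (c : Char) :
    letters.contains (String.ofList [c]) = ('a' ≤ c && c ≤ 'z') := by
  rw [Bool.eq_iff_iff]
  constructor
  · intro h
    simp [letters] at h
    rcases h with h|h|h|h|h|h|h|h|h|h|h|h|h|h|h|h|h|h|h|h|h|h|h|h|h|h <;>
      (replace h := congrArg String.toList h; simp at h; subst h; decide)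
  · intro h
    simp only [Bool.and_eq_true, decide_eq_true_eq] at h
    have h1 : 97 ≤ c.toNat := by
      have := h.1; rw [Char.le_def] at this; exact this
    have h2 : c.toNat ≤ 122 := by
      have := h.2; rw [Char.le_def] at this; exact this
    rw [← Char.ofNat_toNat c]
    exact pv_char_ofNat_toNat_aux c.toNat h1 h2

theorem pv_foldA (size : Int) (cs : List Char) (acc : List String) (i : Int) :
    (cs.foldl
      (fun (st : List String × Int) c =>
        ((if st.2 > 0 ∧ PySem.Int.mod st.2 size = 0 then st.1 ++ [" "] else st.1)
           ++ [String.ofList [c]], st.2 + 1)) (acc, i)).1 = acc ++ pvEmit size i cs := by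
  induction cs generalizing acc i with
  | nil => simp [pvEmit]
  | cons c cs ih =>
    simp only [List.foldl_cons, pvEmit]
    rw [ih]
    split_ifs <;> simp

theorem pv_join_nil (ps : List (List Char)) : PySem.Chars.join [] ps = ps.flatten := by
  simp only [PySem.Chars.join, List.intercalate]
  induction ps with
  | nil => rfl
  | cons p rest ih =>
    cases rest with
    | nil => rfl
    | cons q r => simp_all [List.intersperse]

theorem pv_flatten_emit (size i : Int) (cs : List Char) :
    ((pvEmit size i cs).map String.toList).flatten = pvEmitC size i cs := by
  induction cs generalizing i with
  | nil => simp [pvEmit, pvEmitC]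
  | cons c cs ih =>
    simp only [pvEmit, pvEmitC]
    split_ifs <;> simp [ih]

theorem pv_pyRange_shift (a b s : Int) (hs : 0 < s) :
    PySem.List.pyRange (a + s) b s = (PySem.List.pyRange a (b - s) s).map (· + s) := by
  rw [PySem.List.pyRange_of_pos _ _ hs, PySem.List.pyRange_of_pos _ _ hs, List.map_map]
  simp only [show (a + s < b) = (a < b - s) from propext (by omega),
    show b - (a + s) + s - 1 = b - a - 1 from by ring,
    show b - s - a + s - 1 = b - a - 1 from by ring]
  apply List.map_congr_left
  intro k _
  simp [Function.comp]; ring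

theorem pv_pyRange_cons (a b s : Int) (hs : 0 < s) (hab : a < b) :
    PySem.List.pyRange a b s = a :: PySem.List.pyRange (a + s) b s := by
  rw [PySem.List.pyRange_of_pos _ _ hs, PySem.List.pyRange_of_pos _ _ hs, if_pos hab]
  have hq0 : 0 ≤ (b - a - 1) / s := Int.ediv_nonneg (by omega) (by omega)
  have hstep : (b - a + s - 1) / s = (b - a - 1) / s + 1 := by
    rw [show b - a + s - 1 = (b - a - 1) + 1 * s from by ring,
        Int.add_mul_ediv_right _ _ (by omega : s ≠ 0)]
  rw [hstep, show ((b - a - 1) / s + 1).toNat = ((b - a - 1) / s).toNat + 1 from by omega,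
      List.range_succ_eq_map]
  simp only [List.map_cons, List.map_map, Nat.cast_zero, mul_zero, add_zero, List.cons.injEq,
    true_and]
  simp only [show b - (a + s) + s - 1 = b - a - 1 from by ring]
  by_cases hc : a + s < b
  · rw [if_pos hc]
    apply List.map_congr_left
    intro k _
    simp [Function.comp, Nat.succ_eq_add_one]; ring
  · rw [if_neg hc]
    have : (b - a - 1) / s = 0 := Int.ediv_eq_zero_of_lt (by omega) (by omega)
    simp [this]

theorem pv_pyRange_nil (b s : Int) (hs : 0 < s) (hb : b ≤ 0) :
    PySem.List.pyRange 0 b s = [] := by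
  rw [PySem.List.pyRange_of_pos _ _ hs, if_neg (by omega)]
  simp

theorem pv_slice_shift (L : List Char) (k : Nat) (i : Int) (hi : 0 ≤ i) :
    PySem.List.slice L (some (i + k)) (some (i + k + k)) =
      PySem.List.slice (L.drop k) (some i) (some (i + k)) := by
  obtain ⟨j, rfl⟩ : ∃ j : Nat, i = (j : Int) := ⟨i.toNat, by omega⟩
  have e1 : (j : Int) + (k : Int) = ((j + k : Nat) : Int) := by push_cast; ring
  have e2 : (j : Int) + (k : Int) + (k : Int) = ((j + k + k : Nat) : Int) := by push_cast; ring
  rw [e2, e1, PySem.List.slice_natCast, PySem.List.slice_natCast, List.drop_drop]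
  congr 1
  · omega
  · congr 1
    omega

theorem pv_rangeChunks (k : Nat) (hk : 1 ≤ k) (L : List Char) :
    (PySem.List.pyRange 0 (L.length : Int) (k : Int)).map
      (fun i => PySem.List.slice L (some i) (some (i + (k : Int)))) = pvChunks (k - 1) L := by
  have hks : (0 : Int) < k := by exact_mod_cast hk
  have main : ∀ n (L : List Char), L.length ≤ n →
      (PySem.List.pyRange 0 (L.length : Int) (k : Int)).map
        (fun i => PySem.List.slice L (some i) (some (i + (k : Int)))) = pvChunks (k - 1) L := by
    intro n
    induction n with
    | zero =>
      intro L hL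
      have : L = [] := List.eq_nil_of_length_eq_zero (by omega)
      subst this
      rw [show (([] : List Char).length : Int) = 0 from by simp, pv_pyRange_nil 0 k hks le_rfl]
      simp [pvChunks]
    | succ n ih =>
      intro L hL
      cases L with
      | nil =>
        rw [show (([] : List Char).length : Int) = 0 from by simp, pv_pyRange_nil 0 k hks le_rfl]
        simp [pvChunks]
      | cons c cs =>
        rw [pv_pyRange_cons 0 _ _ hks (by simp only [List.length_cons]; omega), List.map_cons]
        have hhead : PySem.List.slice (c :: cs) (some 0) (some (0 + (k : Int)))
            = (c :: cs).take k := by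
          rw [PySem.List.slice_zero_start, PySem.List.slice_to _ (by omega)]
          simp
        rw [hhead]
        have hshift := pv_pyRange_shift 0 ((c :: cs).length : Int) (k : Int) hks
        rw [zero_add] at hshift
        rw [zero_add, hshift, List.map_map]
        rw [show pvChunks (k - 1) (c :: cs)
              = (c :: cs).take (k - 1 + 1) :: pvChunks (k - 1) ((c :: cs).drop (k - 1 + 1)) from
            by rw [pvChunks]]
        rw [show k - 1 + 1 = k from by omega]
        simp only [List.cons.injEq, true_and]
        have hcongr : ∀ i ∈ PySem.List.pyRange 0 (((c :: cs).length : Int) - (k : Int)) (k : Int),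
            ((fun i => PySem.List.slice (c :: cs) (some i) (some (i + (k : Int)))) ∘ (· + (k : Int))) i
              = PySem.List.slice ((c :: cs).drop k) (some i) (some (i + (k : Int))) := by
          intro i hi
          have h0 : 0 ≤ i := ((PySem.List.mem_pyRange_iff_of_pos hks i).mp hi).1
          simp only [Function.comp]
          exact pv_slice_shift (c :: cs) k i h0
        rw [List.map_congr_left hcongr]
        by_cases hlen : k ≤ (c :: cs).length
        · have hcast : ((c :: cs).length : Int) - (k : Int) = (((c :: cs).drop k).length : Int) := by
            simp only [List.length_drop, List.length_cons] at *
            omega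
          rw [hcast, ih ((c :: cs).drop k) (by simp only [List.length_drop, List.length_cons] at hL ⊢; omega)]
        · have h1 : PySem.List.pyRange 0 (((c :: cs).length : Int) - (k : Int)) (k : Int) = [] :=
            pv_pyRange_nil _ _ hks (by omega)
          have h2 : (c :: cs).drop k = [] := by
            rw [List.drop_eq_nil_iff]; omega
          rw [h1, h2]
          simp [pvChunks]
  exact main L.length L le_rfl

theorem pv_mod_succ (i k : Int) (hk : 0 < k) (h : PySem.Int.mod i k + 1 < k) :
    PySem.Int.mod (i + 1) k = PySem.Int.mod i k + 1 := by
  simp only [PySem.Int.mod_eq_emod_of_pos hk] at *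
  have hd := Int.emod_add_mul_ediv i k
  have hnn : 0 ≤ i % k := Int.emod_nonneg i (by omega)
  calc (i + 1) % k = (i % k + 1 + k * (i / k)) % k := by
        rw [show i % k + 1 + k * (i / k) = i % k + k * (i / k) + 1 from by ring, hd]
    _ = (i % k + 1) % k := Int.add_mul_emod_self_left (i % k + 1) k (i / k)
    _ = i % k + 1 := Int.emod_eq_of_lt (by omega) h

theorem pv_mod_add_self (i k : Int) (hk : 0 < k) (h : PySem.Int.mod i k = 0) :
    PySem.Int.mod (i + k) k = 0 := by
  rw [PySem.Int.mod_eq_emod_of_pos hk] at *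
  rw [Int.add_emod, h]
  simp

theorem pv_run (k : Nat) (r : Nat) (hrk : r < k) :
    ∀ (L : List Char) (i : Int), 0 ≤ i →
      (0 < r → PySem.Int.mod i (k : Int) = ((k - r : Nat) : Int)) →
      pvEmitC (k : Int) i L = L.take r ++ pvEmitC (k : Int) (i + (r : Int)) (L.drop r) := by
  have hks : (0 : Int) < k := by exact_mod_cast Nat.pos_of_ne_zero (by omega)
  induction r with
  | zero => intro L i _ _; simp
  | succ r ih =>
    intro L i hi hmod
    have hmod' := hmod (Nat.succ_pos r)
    cases L with
    | nil => simp [pvEmitC]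
    | cons c cs =>
      have hne : ¬ (i > 0 ∧ PySem.Int.mod i (k : Int) = 0) := by
        rintro ⟨-, h0⟩
        rw [hmod'] at h0
        have : (k - (r + 1) : Nat) = 0 := by exact_mod_cast h0
        omega
      rw [pvEmitC, if_neg hne]
      cases Nat.eq_zero_or_pos r with
      | inl h0 =>
        subst h0
        simp
      | inr hr =>
        have hmod1 : PySem.Int.mod (i + 1) (k : Int) = ((k - r : Nat) : Int) := by
          rw [pv_mod_succ i k hks (by rw [hmod']; omega), hmod']
          omega
        rw [ih (by omega) cs (i + 1) (by omega) (fun _ => hmod1)]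
        rw [show i + ((r + 1 : Nat) : Int) = i + 1 + (r : Int) from by push_cast; ring]
        simp

theorem pv_emit_chunks (k : Nat) (hk : 1 ≤ k) :
    ∀ (n : Nat) (L : List Char), L.length ≤ n → ∀ i : Int, 0 ≤ i → PySem.Int.mod i (k : Int) = 0 →
      pvEmitC (k : Int) i L =
        (if 0 < i ∧ L ≠ [] then [' '] else []) ++ PySem.Chars.join [' '] (pvChunks (k - 1) L) := by
  have hks : (0 : Int) < k := by exact_mod_cast hk
  intro n
  induction n with
  | zero =>
    intro L hL i _ _
    have : L = [] := List.eq_nil_of_length_eq_zero (by omega)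
    subst this
    simp [pvEmitC, pvChunks, PySem.Chars.join_nil]
  | succ n ih =>
    intro L hL i hi hmod
    cases L with
    | nil => simp [pvEmitC, pvChunks, PySem.Chars.join_nil]
    | cons c cs =>
      rw [pvEmitC]
      have hif : (if i > 0 ∧ PySem.Int.mod i (k : Int) = 0 then ([' '] : List Char) else [])
          = (if 0 < i ∧ (c :: cs) ≠ [] then [' '] else []) := by
        by_cases h1 : 0 < i
        · rw [if_pos ⟨h1, hmod⟩, if_pos ⟨h1, by simp⟩]
        · rw [if_neg (by tauto), if_neg (by tauto)]
      rw [hif]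
      have hmod1 : 0 < k - 1 → PySem.Int.mod (i + 1) (k : Int) = ((k - (k - 1) : Nat) : Int) := by
        intro hk1
        rw [pv_mod_succ i k hks (by rw [hmod]; omega), hmod]
        omega
      rw [pv_run k (k - 1) (by omega) cs (i + 1) (by omega) hmod1]
      rw [show i + 1 + ((k - 1 : Nat) : Int) = i + (k : Int) from by omega]
      rw [show pvChunks (k - 1) (c :: cs)
            = (c :: cs).take (k - 1 + 1) :: pvChunks (k - 1) ((c :: cs).drop (k - 1 + 1)) from
          by rw [pvChunks]]
      rw [show k - 1 + 1 = k from by omega]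
      have hdrop : (c :: cs).drop k = cs.drop (k - 1) := by
        cases k with
        | zero => omega
        | succ k' => simp
      have htake : (c :: cs).take k = c :: cs.take (k - 1) := by
        cases k with
        | zero => omega
        | succ k' => simp
      rw [hdrop, htake]
      by_cases hnil : cs.drop (k - 1) = []
      · rw [hnil, show pvChunks (k - 1) ([] : List Char) = [] from by simp [pvChunks]]
        simp [pvEmitC, PySem.Chars.join_singleton]
      · obtain ⟨ch, chs, hch⟩ : ∃ ch chs, pvChunks (k - 1) (cs.drop (k - 1)) = ch :: chs := by
          cases h : cs.drop (k - 1) with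
          | nil => exact absurd h hnil
          | cons d ds =>
            rw [pvChunks]
            exact ⟨_, _, rfl⟩
        rw [ih (cs.drop (k - 1)) (by simp only [List.length_drop, List.length_cons] at hL ⊢; omega)
              (i + k) (by omega) (pv_mod_add_self i k hks hmod)]
        rw [if_pos (⟨by omega, hnil⟩ : (0 < i + (k : Int) ∧ cs.drop (k - 1) ≠ [])), hch, PySem.Chars.join_cons_cons]
        simp

-- ===== VERDICT (by name: the statement is the Claim_ definition above) =====
theorem bundle_spec : Claim_equal_bundle := by
  intro text size _ hpre
  have hpre' : 1 ≤ size := hpre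
  unfold Spec_bundle bundle bundle_alt
  obtain ⟨k, rfl, hk⟩ : ∃ k : Nat, size = (k : Int) ∧ 1 ≤ k :=
    ⟨size.toNat, by omega, by omega⟩

  apply String.toList_inj.mp
  rw [PySem.Str.toList_join, PySem.Str.toList_join]
  rw [PySem.List.foldl_if_eq_foldl_filter]
  rw [List.filter_congr (fun c _ => pv_contains_eq c)]
  rw [pv_foldA, List.nil_append, show ("" : String).toList = [] from rfl, pv_join_nil,
      pv_flatten_emit]
  set L := (PySem.Str.lower text).toList.filter (fun c => 'a' ≤ c && c ≤ 'z') with hL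
  rw [pv_emit_chunks k hk L.length L le_rfl 0 le_rfl
        (by rw [PySem.Int.mod_eq_emod_of_pos (by exact_mod_cast hk)]; simp)]
  rw [if_neg (by simp)]
  rw [List.map_map]
  have hmapsl : (String.toList ∘ fun i => String.ofList (PySem.List.slice L (some i) (some (i + (k : Int)))))
      = fun i => PySem.List.slice L (some i) (some (i + (k : Int))) := by
    funext i
    simp
  rw [hmapsl, PySem.List.len_eq, pv_rangeChunks k hk L,
      show (" " : String).toList = [' '] from rfl]
  simp
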